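-- pv_equiv track=rewrite | github.com/SolomonGao/DBMSproject | backend/agents/enhanced_reporter.py | _parse_report_text
-- ===== SOURCE A (Python) =====
-- from typing import Dict, Any, List, Optional
--
-- def _parse_report_text(text: str) -> tuple[str, List[str]]:
--     """Parse LLM output into summary and key findings."""
--     lines = [l.strip() for l in text.split("\n") if l.strip()]
--     summary_lines = []
--     findings = []
--     in_findings = False
--
--     for line in lines:
--         lower = line.lower()
--         if any(k in lower for k in ("key finding", "findings", "highlights", "key points", "takeaways")):
--             in_findings = True
--             continue
--
--         if in_findings:
--             if line.startswith(("- ", "* ", "• ")):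
--                 findings.append(line[2:].strip())
--             elif line[0].isdigit() and "." in line[:3]:
--                 findings.append(line[line.find(".") + 1:].strip())
--             elif len(line) < 100 and not line.endswith("."):
--                 findings.append(line)
--             else:
--                 findings.append(line)
--         else:
--             summary_lines.append(line)
--
--     summary = "\n".join(summary_lines) if summary_lines else text
--     if len(summary) > 4000:
--         summary = summary[:4000] + "..."
--
--     return summary, findings
-- ===== SOURCE B (Python) =====
-- _HEADER_KEYWORDS = ("key finding", "findings", "highlights", "key points", "takeaways")
--
--
-- def _is_header(line: str) -> bool:
--     low = line.lower()
--     return any(k in low for k in _HEADER_KEYWORDS)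
--
--
-- def _extract(line: str) -> str:
--     if line.startswith(("- ", "* ", "• ")):
--         return line[2:].strip()
--     if line[0].isdigit() and "." in line[:3]:
--         return line[line.find(".") + 1:].strip()
--     return line
--
--
-- def _parse_report_text(text: str) -> tuple[str, list]:
--     lines = [l.strip() for l in text.split("\n") if l.strip()]
--     # pass 1: index of the first header line (len(lines) if none)
--     idx = len(lines)
--     for i, l in enumerate(lines):
--         if _is_header(l):
--             idx = i
--             break
--     head = lines[:idx]
--     # pass 2: every post-header line that is not itself a header becomes a finding
--     findings = [_extract(l) for l in lines[idx + 1:] if not _is_header(l)]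
--     summary = "\n".join(head) if head else text
--     if len(summary) > 4000:
--         summary = summary[:4000] + "..."
--     return summary, findings
-- ===== Notes on version B (the rewrite author's own statement) =====
-- stated objective: alternative
-- what changed: Replaces A's single stateful pass with an in_findings flag by a two-pass decomposition: first find the index of the first header line, then take the prefix as summary lines and filter-and-map the suffix into findings.
import Mathlib
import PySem

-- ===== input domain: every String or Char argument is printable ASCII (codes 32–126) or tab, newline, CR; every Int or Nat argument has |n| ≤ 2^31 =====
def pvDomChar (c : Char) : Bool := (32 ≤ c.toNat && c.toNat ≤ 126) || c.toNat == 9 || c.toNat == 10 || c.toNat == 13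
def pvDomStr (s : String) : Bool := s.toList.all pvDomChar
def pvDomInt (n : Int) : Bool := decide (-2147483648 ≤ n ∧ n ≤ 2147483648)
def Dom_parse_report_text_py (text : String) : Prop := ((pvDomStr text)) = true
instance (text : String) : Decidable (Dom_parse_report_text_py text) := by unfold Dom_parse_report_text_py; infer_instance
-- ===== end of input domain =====

-- B replaces A's stateful one-pass flag loop by a two-pass decomposition (find the first
-- header index, then split/filter/map the prefix and suffix); objective: alternative, same cost.

-- the header-keyword tuple, a module constant shared by both versions
def pvKeywords : List String := ["key finding", "findings", "highlights", "key points", "takeaways"]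

-- ===== PORT A =====
-- loop body of A's single for-loop over (summary_lines, findings, in_findings)
def pvAstep (st : List String × List String × Bool) (line : String) : List String × List String × Bool :=
  let lower := PySem.Str.lower line
  if pvKeywords.any (fun k => PySem.Str.isIn k lower) then
    (st.1, st.2.1, true)
  else if st.2.2 then
    if PySem.Str.startswith line "- " || PySem.Str.startswith line "* " || PySem.Str.startswith line "• " then
      (st.1, st.2.1 ++ [PySem.Str.strip (PySem.Str.slice line (some 2) none)], st.2.2)
    -- line[0].isdigit(): lines are non-empty here, so pyGet? is always some; getD false is the total encoding
    else if ((PySem.Str.pyGet? line 0).map PySem.Chars.isdigit).getD false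
            && PySem.Str.isIn "." (PySem.Str.slice line none (some 3)) then
      (st.1, st.2.1 ++ [PySem.Str.strip (PySem.Str.slice line (some (PySem.Str.find line "." + 1)) none)], st.2.2)
    else if decide (PySem.Str.len line < 100) && !PySem.Str.endswith line "." then
      (st.1, st.2.1 ++ [line], st.2.2)
    else
      (st.1, st.2.1 ++ [line], st.2.2)
  else
    (st.1 ++ [line], st.2.1, st.2.2)

def parse_report_text_py (text : String) : String × List String :=
  let lines := (((PySem.Str.split? text "\n").getD []).map PySem.Str.strip).filter (fun l => l != "")
  let st := lines.foldl pvAstep ([], [], false)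
  let summary := if st.1 ≠ [] then PySem.Str.join "\n" st.1 else text
  let summary := if 4000 < PySem.Str.len summary then
      PySem.Str.join "" [PySem.Str.slice summary none (some 4000), "..."] else summary
  (summary, st.2.1)

-- ===== PORT B =====
def pvIsHeader (line : String) : Bool :=
  pvKeywords.any (fun k => PySem.Str.isIn k (PySem.Str.lower line))

def pvExtract (line : String) : String :=
  if PySem.Str.startswith line "- " || PySem.Str.startswith line "* " || PySem.Str.startswith line "• " then
    PySem.Str.strip (PySem.Str.slice line (some 2) none)
  -- line[0].isdigit(): callers pass non-empty lines, getD false is the total encoding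
  else if ((PySem.Str.pyGet? line 0).map PySem.Chars.isdigit).getD false
          && PySem.Str.isIn "." (PySem.Str.slice line none (some 3)) then
    PySem.Str.strip (PySem.Str.slice line (some (PySem.Str.find line "." + 1)) none)
  else line

-- pass 1 of B: index of the first header line (length if none)
def pvHeaderIdx : List String → Nat
  | [] => 0
  | l :: ls => if pvIsHeader l then 0 else pvHeaderIdx ls + 1

def parse_report_text_py_alt (text : String) : String × List String :=
  let lines := (((PySem.Str.split? text "\n").getD []).map PySem.Str.strip).filter (fun l => l != "")
  let idx := pvHeaderIdx lines
  let head := PySem.List.slice lines none (some (idx : Int))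
  let findings := ((PySem.List.slice lines (some ((idx : Int) + 1)) none).filter
      (fun l => !pvIsHeader l)).map pvExtract
  let summary := if head ≠ [] then PySem.Str.join "\n" head else text
  let summary := if 4000 < PySem.Str.len summary then
      PySem.Str.join "" [PySem.Str.slice summary none (some 4000), "..."] else summary
  (summary, findings)

-- ===== PRECONDITION & SPEC =====
def Spec_parse_report_text_py (text : String) (out : String × List String) : Prop := out = parse_report_text_py_alt text
instance (text : String) (out : String × List String) : Decidable (Spec_parse_report_text_py text out) := by unfold Spec_parse_report_text_py; infer_instance

-- ===== CLAIM (what is proved, stated in full; the proofs are below) =====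
def Claim_equal_parse_report_text_py : Prop := ∀ (text : String), Dom_parse_report_text_py text → Spec_parse_report_text_py text (parse_report_text_py text)

-- ===== LEMMAS AND PROOFS =====

-- the header test as both ports compute it
theorem pvIsHeader_eq (l : String) :
    (pvKeywords.any fun k => PySem.Str.isIn k (PySem.Str.lower l)) = pvIsHeader l := rfl

-- once in_findings is true, A's loop appends pvExtract of every non-header line
theorem pvAstep_in (lines : List String) (s f : List String) :
    lines.foldl pvAstep (s, f, true) =
      (s, f ++ (lines.filter (fun l => !pvIsHeader l)).map pvExtract, true) := by
  induction lines generalizing f with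
  | nil => simp
  | cons l ls ih =>
    by_cases h : pvIsHeader l
    · have hstep : pvAstep (s, f, true) l = (s, f, true) := by
        simp only [pvAstep]; rw [pvIsHeader_eq, h]; simp
      simp [List.foldl_cons, hstep, ih, h]
    · have hstep : pvAstep (s, f, true) l = (s, f ++ [pvExtract l], true) := by
        simp only [pvAstep, pvExtract]; rw [pvIsHeader_eq]
        simp only [h, if_false, Bool.false_eq_true]
        split_ifs <;> rfl
      simp [List.foldl_cons, hstep, ih, h]

-- before any header, A's loop collects summary lines; from the first header on it
-- behaves as pvAstep_in describes
theorem pvAstep_pre (lines : List String) (s : List String) :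
    lines.foldl pvAstep (s, [], false) =
      (s ++ lines.take (pvHeaderIdx lines),
       ((lines.drop (pvHeaderIdx lines + 1)).filter (fun l => !pvIsHeader l)).map pvExtract,
       lines.any pvIsHeader) := by
  induction lines generalizing s with
  | nil => simp [pvHeaderIdx]
  | cons l ls ih =>
    by_cases h : pvIsHeader l
    · have hstep : pvAstep (s, [], false) l = (s, [], true) := by
        simp only [pvAstep]; rw [pvIsHeader_eq, h]; simp
      simp [List.foldl_cons, hstep, pvAstep_in, pvHeaderIdx, h]
    · have hstep : pvAstep (s, [], false) l = (s ++ [l], [], false) := by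
        simp only [pvAstep]; rw [pvIsHeader_eq]; simp [h]
      simp only [List.foldl_cons, hstep, ih, pvHeaderIdx, h, List.any_cons, Bool.false_or]
      simp [List.take_succ_cons]

-- ===== VERDICT (by name: the statement is the Claim_ definition above) =====
theorem parse_report_text_py_spec : Claim_equal_parse_report_text_py := by
  intro text _
  show parse_report_text_py text = parse_report_text_py_alt text
  unfold parse_report_text_py parse_report_text_py_alt
  set lines := (((PySem.Str.split? text "\n").getD []).map PySem.Str.strip).filter (fun l => l != "") with hl
  simp only [pvAstep_pre lines [], List.nil_append]
  rw [PySem.List.slice_to lines (b := (pvHeaderIdx lines : Int)) (by positivity),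
      PySem.List.slice_from lines (a := (pvHeaderIdx lines : Int) + 1) (by positivity)]
  have h1 : ((pvHeaderIdx lines : Int)).toNat = pvHeaderIdx lines := by simp
  have h2 : ((pvHeaderIdx lines : Int) + 1).toNat = pvHeaderIdx lines + 1 := by omega
  rw [h1, h2]
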